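-- pv_equiv track=rewrite | github.com/1alexvlad/Google-Books-API | utils/isbn_utils.py | extract_isbn_identifiers
-- ===== SOURCE A (Python) =====
-- from typing import List, Dict
--
-- def extract_isbn_identifiers(industry_identifiers: List[Dict[str, str]] | None) -> Dict[str, str | None]:
--     isbn_10 = None
--     isbn_13 = None
--
--     if industry_identifiers:
--         for identifier in industry_identifiers:
--             id_type = identifier.get('type', '')
--             id_value = identifier.get('identifier', '')
--
--             if id_type == 'ISBN_10':
--                 isbn_10 = id_value
--             elif id_type == 'ISBN_13':
--                 isbn_13 = id_value
--
--     return {'isbn_10': isbn_10, 'isbn_13': isbn_13}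
-- ===== SOURCE B (Python) =====
-- def extract_isbn_identifiers(industry_identifiers):
--     def last_value_of(key):
--         # Scan from the back; the first match seen is the last occurrence,
--         # which is what A's overwriting forward pass keeps. Stops early.
--         for identifier in reversed(industry_identifiers or []):
--             if identifier.get('type', '') == key:
--                 return identifier.get('identifier', '')
--         return None
--     return {'isbn_10': last_value_of('ISBN_10'), 'isbn_13': last_value_of('ISBN_13')}
-- ===== Notes on version B (the rewrite author's own statement) =====
-- stated objective: alternative
-- what changed: B replaces A's single forward pass with two overwriting accumulators by two independent back-to-front searches that return at the first match (the last occurrence, which is what A's overwriting keeps) and can stop early.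
import Mathlib
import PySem

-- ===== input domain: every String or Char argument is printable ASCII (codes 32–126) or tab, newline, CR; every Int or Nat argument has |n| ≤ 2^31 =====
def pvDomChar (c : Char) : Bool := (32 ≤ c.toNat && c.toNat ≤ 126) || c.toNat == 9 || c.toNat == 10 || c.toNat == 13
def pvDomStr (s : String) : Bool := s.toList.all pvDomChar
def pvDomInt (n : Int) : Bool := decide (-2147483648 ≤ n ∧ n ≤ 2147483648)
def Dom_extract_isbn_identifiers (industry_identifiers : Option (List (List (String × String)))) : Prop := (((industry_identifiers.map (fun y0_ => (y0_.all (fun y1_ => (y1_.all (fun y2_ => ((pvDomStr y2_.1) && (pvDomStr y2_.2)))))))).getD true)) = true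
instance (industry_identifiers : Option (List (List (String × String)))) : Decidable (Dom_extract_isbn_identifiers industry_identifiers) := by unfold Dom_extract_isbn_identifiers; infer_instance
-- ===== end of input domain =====

-- B replaces A's forward pass with two accumulators by two back-to-front first-match searches (alternative decomposition, same cost).
-- ===== PORT A =====
-- first-match lookup on the association-list image of a Python dict
def pvGetStrD (d : List (String × String)) (k dflt : String) : String :=
  (PySem.Dict.mk d).getD k dflt

def extract_isbn_identifiers (industry_identifiers : Option (List (List (String × String)))) : List (String × Option String) :=
  let st :=
    match industry_identifiers with
    | some l =>
      if l.isEmpty then ((none : Option String), (none : Option String))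
      else
        l.foldl (fun (st : Option String × Option String) identifier =>
          let id_type := pvGetStrD identifier "type" ""
          let id_value := pvGetStrD identifier "identifier" ""
          if id_type = "ISBN_10" then (some id_value, st.2)
          else if id_type = "ISBN_13" then (st.1, some id_value)
          else st) ((none : Option String), (none : Option String))
    | none => ((none : Option String), (none : Option String))
  [("isbn_10", st.1), ("isbn_13", st.2)]

-- ===== PORT B =====
-- `for identifier in reversed(industry_identifiers or []): if ... return ...; return None`
def pvLastValueOf (l : List (List (String × String))) (key : String) : Option String :=
  match l with
  | [] => none
  | identifier :: rest =>
    match pvLastValueOf rest key with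
    | some v => some v
    | none => if pvGetStrD identifier "type" "" = key
              then some (pvGetStrD identifier "identifier" "") else none

def extract_isbn_identifiers_alt (industry_identifiers : Option (List (List (String × String)))) : List (String × Option String) :=
  let l := match industry_identifiers with | some l => l | none => []
  [("isbn_10", pvLastValueOf l "ISBN_10"), ("isbn_13", pvLastValueOf l "ISBN_13")]

-- ===== PRECONDITION & SPEC =====
def Spec_extract_isbn_identifiers (industry_identifiers : Option (List (List (String × String)))) (out : List (String × Option String)) : Prop := out = extract_isbn_identifiers_alt industry_identifiers
instance (industry_identifiers : Option (List (List (String × String)))) (out : List (String × Option String)) : Decidable (Spec_extract_isbn_identifiers industry_identifiers out) := by unfold Spec_extract_isbn_identifiers; infer_instance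

-- ===== CLAIM =====
def Claim_equal_extract_isbn_identifiers : Prop := ∀ (industry_identifiers : Option (List (List (String × String)))), Dom_extract_isbn_identifiers industry_identifiers → Spec_extract_isbn_identifiers industry_identifiers (extract_isbn_identifiers industry_identifiers)

-- ===== LEMMAS AND PROOFS =====

lemma fold_eq (l : List (List (String × String))) (st : Option String × Option String) :
    l.foldl (fun (st : Option String × Option String) identifier =>
        let id_type := pvGetStrD identifier "type" ""
        let id_value := pvGetStrD identifier "identifier" ""
        if id_type = "ISBN_10" then (some id_value, st.2)
        else if id_type = "ISBN_13" then (st.1, some id_value)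
        else st) st =
      ((pvLastValueOf l "ISBN_10").elim st.1 some,
       (pvLastValueOf l "ISBN_13").elim st.2 some) := by
  induction l generalizing st with
  | nil => simp [pvLastValueOf]
  | cons e rest ih =>
    simp only [List.foldl_cons, ih, pvLastValueOf]
    cases h10 : pvLastValueOf rest "ISBN_10" <;> cases h13 : pvLastValueOf rest "ISBN_13" <;>
      by_cases h1 : pvGetStrD e "type" "" = "ISBN_10" <;>
      by_cases h2 : pvGetStrD e "type" "" = "ISBN_13" <;>
      simp_all

-- ===== VERDICT =====
theorem extract_isbn_identifiers_spec : Claim_equal_extract_isbn_identifiers := by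
  intro ids _
  unfold Spec_extract_isbn_identifiers extract_isbn_identifiers extract_isbn_identifiers_alt
  cases ids with
  | none => rfl
  | some l =>
    by_cases hl : l.isEmpty
    · rw [List.isEmpty_iff] at hl
      simp [hl, pvLastValueOf]
    · simp only [if_neg hl, fold_eq l (none, none)]
      cases pvLastValueOf l "ISBN_10" <;> cases pvLastValueOf l "ISBN_13" <;> rfl
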